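-- pv_equiv track=rewrite | github.com/zeldu18/Pink-Tax-Comparison | build_quality_queue.py | duplicate_issue_map
-- ===== SOURCE A (Python) =====
-- from collections import Counter, defaultdict
--
-- def duplicate_issue_map(rows: list[dict[str, str | None]]) -> dict[int, bool]:
--     """
--     Mark duplicate rows by a strict row identity key.
--     """
--
--     key_to_idx: dict[tuple, list[int]] = defaultdict(list)
--
--     for idx, row in enumerate(rows):
--         key = (
--             row.get("pair_code", ""),
--             row.get("city", ""),
--             row.get("retailer", ""),
--             row.get("date_observed", ""),
--             row.get("female_product", ""),
--             row.get("male_product", ""),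
--         )
--         key_to_idx[key].append(idx)
--
--     dup_map: dict[int, bool] = {}
--
--     for idxs in key_to_idx.values():
--         is_dup = len(idxs) > 1
--         for idx in idxs:
--             dup_map[idx] = is_dup
--
--     return dup_map
-- ===== SOURCE B (Python) =====
-- def duplicate_issue_map(rows: list[dict[str, str | None]]) -> dict[int, bool]:
--     """
--     Mark duplicate rows by a strict row identity key.
--     """
--     keys = [
--         (
--             row.get("pair_code", ""),
--             row.get("city", ""),
--             row.get("retailer", ""),
--             row.get("date_observed", ""),
--             row.get("female_product", ""),
--             row.get("male_product", ""),
--         )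
--         for row in rows
--     ]
--     dup_map: dict[int, bool] = {}
--     for i, k in enumerate(keys):
--         if k in keys[:i]:
--             continue  # this key's whole group was already emitted
--         idxs = [j for j, kj in enumerate(keys) if kj == k]
--         dup = len(idxs) > 1
--         for j in idxs:
--             dup_map[j] = dup
--     return dup_map
-- ===== Notes on version B (the rewrite author's own statement) =====
-- stated objective: alternative
-- what changed: A builds a defaultdict mapping each six-field key to its list of row indices and then walks the buckets; B keeps no buckets at all: it precomputes the list of keys once and, at each key's first occurrence, emits that key's whole index group by rescanning the key list, skipping later occurrences via a prefix membership test.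
import Mathlib
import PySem

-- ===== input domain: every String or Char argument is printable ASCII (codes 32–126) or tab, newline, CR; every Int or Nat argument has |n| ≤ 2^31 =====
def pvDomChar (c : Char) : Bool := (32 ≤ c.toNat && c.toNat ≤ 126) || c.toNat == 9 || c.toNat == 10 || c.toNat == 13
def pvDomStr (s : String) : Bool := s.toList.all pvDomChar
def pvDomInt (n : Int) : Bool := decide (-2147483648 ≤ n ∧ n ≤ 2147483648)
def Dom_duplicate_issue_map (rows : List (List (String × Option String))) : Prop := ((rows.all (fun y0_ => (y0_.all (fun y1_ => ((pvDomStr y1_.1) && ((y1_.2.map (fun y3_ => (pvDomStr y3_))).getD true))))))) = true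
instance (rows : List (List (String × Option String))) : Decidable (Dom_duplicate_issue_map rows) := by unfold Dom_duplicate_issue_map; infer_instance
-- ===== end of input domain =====

-- B replaces A's defaultdict-of-index-buckets with a bucket-free rescan: it precomputes the key list and,
-- at each key's first occurrence, emits that key's whole index group by rescanning the key list (objective: alternative).

-- the six-field identity key both Pythons build with row.get(field, "")
def pvKey (row : List (String × Option String)) : Option String × Option String × Option String × Option String × Option String × Option String :=
  (PySem.Dict.getD ⟨row⟩ "pair_code" (some ""),
   PySem.Dict.getD ⟨row⟩ "city" (some ""),
   PySem.Dict.getD ⟨row⟩ "retailer" (some ""),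
   PySem.Dict.getD ⟨row⟩ "date_observed" (some ""),
   PySem.Dict.getD ⟨row⟩ "female_product" (some ""),
   PySem.Dict.getD ⟨row⟩ "male_product" (some ""))

-- ===== PORT A =====
def duplicate_issue_map (rows : List (List (String × Option String))) : List (Int × Bool) :=
  let key_to_idx :=
    (PySem.List.enumerate rows 0).foldl
      (fun d p => d.modify (pvKey p.2) [] (fun l => l ++ [p.1]))
      (PySem.Dict.empty : PySem.Dict _ (List Int))
  let dup_map :=
    key_to_idx.values.foldl
      (fun m idxs =>
        let is_dup := decide (1 < idxs.length)
        idxs.foldl (fun m idx => m.insert idx is_dup) m)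
      (PySem.Dict.empty : PySem.Dict Int Bool)
  dup_map.items

-- ===== PORT B =====
def duplicate_issue_map_alt (rows : List (List (String × Option String))) : List (Int × Bool) :=
  let keys := rows.map (fun row => pvKey row)
  let dup_map :=
    (PySem.List.enumerate keys 0).foldl
      (fun m p =>
        if (PySem.List.slice keys none (some p.1)).contains p.2 then m
        else
          let idxs := ((PySem.List.enumerate keys 0).filter (fun q => q.2 == p.2)).map (fun q => q.1)
          let dup := decide (1 < idxs.length)
          idxs.foldl (fun m j => m.insert j dup) m)
      (PySem.Dict.empty : PySem.Dict Int Bool)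
  dup_map.items


-- ===== PRECONDITION & SPEC =====
def Spec_duplicate_issue_map (rows : List (List (String × Option String))) (out : List (Int × Bool)) : Prop := out = duplicate_issue_map_alt rows
instance (rows : List (List (String × Option String))) (out : List (Int × Bool)) : Decidable (Spec_duplicate_issue_map rows out) := by unfold Spec_duplicate_issue_map; infer_instance

-- ===== CLAIM (what is proved, stated in full; the proofs are below) =====
def Claim_equal_duplicate_issue_map : Prop := ∀ (rows : List (List (String × Option String))), Dom_duplicate_issue_map rows → Spec_duplicate_issue_map rows (duplicate_issue_map rows)

-- ===== LEMMAS AND PROOFS =====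

def pvGrp {κ : Type} [BEq κ] (ks : List κ) (k : κ) : List Int :=
  ((PySem.List.enumerate ks 0).filter (fun q => q.2 == k)).map (fun q => q.1)

lemma pvMem_grp {κ : Type} [BEq κ] [LawfulBEq κ] (ks : List κ) (k : κ) (i : Int) :
    i ∈ pvGrp ks k ↔ ∃ (j : Nat) (h : j < ks.length), i = (j : Int) ∧ ks[j] = k := by
  simp only [pvGrp, List.mem_map, List.mem_filter, PySem.List.mem_enumerate_iff]
  constructor
  · rintro ⟨q, ⟨⟨j, hj, rfl⟩, hq⟩, rfl⟩
    refine ⟨j, hj, by simp, by simpa using hq⟩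
  · rintro ⟨j, hj, rfl, hk⟩
    exact ⟨((j:Int), ks[j]), ⟨⟨j, hj, by simp⟩, by simpa using hk⟩, rfl⟩

lemma pvGrp_nodup {κ : Type} [BEq κ] (ks : List κ) (k : κ) : (pvGrp ks k).Nodup := by
  have h := PySem.List.pairwise_lt_enumerate ks (0:Int)
  have h2 : ((PySem.List.enumerate ks 0).filter (fun q => q.2 == k)).Pairwise (fun p q => p.1 < q.1) :=
    h.filter _
  have h3 : (pvGrp ks k).Pairwise (· < ·) := h2.map _ (fun a b hab => hab)
  exact h3.imp (fun h => ne_of_lt h)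

lemma pvFlat_nodup {κ : Type} [BEq κ] [LawfulBEq κ] (ks : List κ) (D : List κ) (hD : D.Nodup) :
    (D.flatMap (fun k => pvGrp ks k)).Nodup := by
  induction D with
  | nil => simp
  | cons k D ih =>
    simp only [List.flatMap_cons]
    rw [List.nodup_append]
    refine ⟨pvGrp_nodup ks k, ih (List.nodup_cons.mp hD).2, ?_⟩
    intro a ha b hb rfl
    rw [List.mem_flatMap] at hb
    obtain ⟨k', hk', hb⟩ := hb
    rw [pvMem_grp] at ha hb
    obtain ⟨j, hj, rfl, hjk⟩ := ha
    obtain ⟨j', hj', hjj, hjk'⟩ := hb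
    have : j = j' := by omega
    subst this
    have : k = k' := hjk ▸ hjk'
    exact ((List.nodup_cons.mp hD).1 (this ▸ hk')).elim

lemma pvIns_group (idxs : List Int) (c : Bool) (m : PySem.Dict Int Bool)
    (hnd : idxs.Nodup) (hfresh : ∀ i ∈ idxs, m.contains i = false) :
    (idxs.foldl (fun m i => m.insert i c) m).items = m.items ++ idxs.map (fun i => (i, c)) := by
  have := PySem.Dict.items_foldl_insert_fresh (l := idxs) (k := id) (v := fun _ => c) (d := m)
    (by simpa using hfresh) (by simpa using hnd)
  simpa using this

lemma pvDict_fold_groups {α : Type} (l : List α) (gi : α → List Int) (gc : α → Bool)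
    (cond : α → Bool) (m : PySem.Dict Int Bool)
    (H : (m.keys ++ l.flatMap (fun p => if cond p then [] else gi p)).Nodup) :
    (l.foldl
        (fun m p =>
          if cond p then m
          else
            let idxs := gi p
            let dup := gc p
            idxs.foldl (fun m j => m.insert j dup) m)
        m).items
      = m.items ++ l.flatMap (fun p => if cond p then [] else (gi p).map (fun j => (j, gc p))) := by
  induction l generalizing m with
  | nil => simp
  | cons p l ih =>
    by_cases hc : cond p
    · simp only [List.foldl_cons, hc, if_true, List.flatMap_cons]
      have := ih m (by simpa [hc] using H)
      simpa [hc] using this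
    · simp only [List.flatMap_cons, hc, Bool.false_eq_true, if_false] at H
      rw [List.nodup_append] at H
      obtain ⟨hk, hrest, hdisj⟩ := H
      have hsplit := List.nodup_append.mp hrest
      have hnd : (gi p).Nodup := hsplit.1
      have hfresh : ∀ i ∈ gi p, m.contains i = false := by
        intro i hi
        rw [PySem.Dict.contains_eq_decide_mem_keys]
        simp only [decide_eq_false_iff_not]
        exact fun hmem => hdisj i hmem i (List.mem_append_left _ hi) rfl
      set m' := (gi p).foldl (fun m j => m.insert j (gc p)) m with hm'
      have hitems : m'.items = m.items ++ (gi p).map (fun i => (i, gc p)) :=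
        pvIns_group _ _ _ hnd hfresh
      have hkeys : m'.keys = m.keys ++ gi p := by
        simp only [PySem.Dict.keys, hitems, List.map_append, List.map_map]
        simp [Function.comp_def]
      have H' : (m'.keys ++ l.flatMap (fun p => if cond p then [] else gi p)).Nodup := by
        rw [hkeys, List.append_assoc, List.nodup_append]
        exact ⟨hk, hrest, hdisj⟩
      have := ih m' H'
      simp only [List.foldl_cons, if_neg hc]
      rw [show ((gi p).foldl (fun m j => m.insert j (gc p)) m) = m' from rfl] at *
      rw [this, hitems, List.flatMap_cons, if_neg hc, List.append_assoc]

lemma pvFirstocc_flatMap {κ α : Type} [BEq κ] [LawfulBEq κ] (K : List κ) (g : κ → List α) :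
    (PySem.List.enumerate K 0).flatMap
        (fun p => if (K.take p.1.toNat).contains p.2 then [] else g p.2)
      = (PySem.Set.ofList K).flatMap g := by
  induction K using List.reverseRecOn with
  | nil => simp [PySem.List.enumerate, PySem.Set.ofList]
  | append_singleton K k ih =>
    rw [PySem.List.enumerate_append, List.flatMap_append]
    have hfix :
        (PySem.List.enumerate K 0).flatMap
            (fun p => if ((K ++ [k]).take p.1.toNat).contains p.2 then [] else g p.2)
          = (PySem.List.enumerate K 0).flatMap
            (fun p => if (K.take p.1.toNat).contains p.2 then [] else g p.2) := by
      apply List.flatMap_congr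
      intro p hp
      rw [PySem.List.mem_enumerate_iff] at hp
      obtain ⟨j, hj, rfl⟩ := hp
      have h1 : ((0 : Int) + (j : Int)).toNat = j := by omega
      rw [h1, List.take_append_of_le_length (le_of_lt hj)]
    rw [hfix, ih]
    have h2 : PySem.List.enumerate [k] ((0:Int) + (K.length : Int)) = [((K.length : Int), k)] := by
      simp [PySem.List.enumerate_cons, PySem.List.enumerate_nil]
    rw [h2]
    have h3 : ((K.length : Int)).toNat = K.length := by omega
    have hofl : PySem.Set.ofList (K ++ [k]) = PySem.Set.add (PySem.Set.ofList K) k := by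
      rw [PySem.Set.ofList_eq_foldl, PySem.Set.ofList_eq_foldl, List.foldl_append]
      rfl
    by_cases hk : k ∈ K
    · have hc1 : ((K ++ [k]).take K.length).contains k = true := by
        rw [List.take_left]; simpa using hk
      have hc2 : (PySem.Set.ofList K).contains k = true := by
        simpa [PySem.Set.contains, PySem.Set.mem_ofList] using hk
      simp only [List.flatMap_cons, List.flatMap_nil, h3, hc1, if_true, hofl, PySem.Set.add, hc2]
      simp
    · have hc1 : ((K ++ [k]).take K.length).contains k = false := by
        rw [List.take_left]; simpa using hk
      have hc2 : (PySem.Set.ofList K).contains k = false := by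
        simpa [PySem.Set.contains, PySem.Set.mem_ofList] using hk
      simp only [List.flatMap_cons, List.flatMap_nil, h3, hc1, hofl, PySem.Set.add, hc2]
      simp

lemma pvEnum_map {α β : Type} (f : α → β) (l : List α) (s : Int) :
    PySem.List.enumerate (l.map f) s = (PySem.List.enumerate l s).map (fun p => (p.1, f p.2)) := by
  induction l generalizing s with
  | nil => simp [PySem.List.enumerate_nil]
  | cons x l ih => simp [PySem.List.enumerate_cons, ih]

theorem pvMain_eq (rows : List (List (String × Option String))) :
    duplicate_issue_map rows = duplicate_issue_map_alt rows := by
  unfold duplicate_issue_map duplicate_issue_map_alt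
  set ks := rows.map (fun row => pvKey row) with hks
  set d := (PySem.List.enumerate rows 0).foldl
      (fun d p => d.modify (pvKey p.2) [] (fun l => l ++ [p.1]))
      (PySem.Dict.empty : PySem.Dict _ (List Int)) with hd
  -- keys of d
  have hkeys : d.keys = PySem.Set.ofList ks := by
    rw [hd, PySem.Dict.keys_foldl_modify_key]
    have : (PySem.List.enumerate rows 0).map (fun p => pvKey p.2) = ks := by
      rw [hks, show (fun (p : Int × List (String × Option String)) => pvKey p.2)
          = ((fun row => pvKey row) ∘ (fun (p : Int × List (String × Option String)) => p.2)) from rfl,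
        ← List.map_map, PySem.List.map_snd_enumerate]
    rw [this]
    rfl
  have hnodup : d.keys.Nodup := by
    rw [hd]
    exact PySem.Dict.nodup_keys_foldl_modify_key _ _ _ _ _ (by simp)
  -- buckets of d
  have hgetD : ∀ k, d.getD k [] = pvGrp ks k := by
    intro k
    have hfold : d = ((PySem.List.enumerate rows 0).map (fun p => (pvKey p.2, p.1))).foldl
        (fun d q => d.modify q.1 [] (fun l => l ++ [q.2])) PySem.Dict.empty := by
      rw [hd, List.foldl_map]
    rw [hfold, PySem.Dict.getD_foldl_modify_append]
    rw [List.filter_map, List.map_map]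
    rw [pvGrp, hks, pvEnum_map, List.filter_map, List.map_map]
    rfl
  have hvalues : d.values = (PySem.Set.ofList ks).map (fun k => pvGrp ks k) := by
    rw [PySem.Dict.values_eq_map_keys d hnodup [], hkeys]
    exact List.map_congr_left (fun k _ => hgetD k)
  -- phase 2 of A
  have hA : (d.values.foldl
      (fun m idxs =>
        let is_dup := decide (1 < idxs.length)
        idxs.foldl (fun m idx => m.insert idx is_dup) m)
      (PySem.Dict.empty : PySem.Dict Int Bool)).items
      = (PySem.Set.ofList ks).flatMap
          (fun k => (pvGrp ks k).map (fun j => (j, decide (1 < (pvGrp ks k).length)))) := by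
    have := pvDict_fold_groups (l := d.values) (gi := fun idxs => idxs)
      (gc := fun idxs => decide (1 < idxs.length)) (cond := fun _ => false)
      (m := PySem.Dict.empty)
      (by
        simp only [Bool.false_eq_true, if_false, List.flatMap_id', PySem.Dict.keys_empty,
          List.nil_append, hvalues]
        rw [← List.flatMap_def]
        exact pvFlat_nodup ks _ (PySem.Set.nodup_ofList ks))
    simp only [Bool.false_eq_true, if_false,
      show (PySem.Dict.empty : PySem.Dict Int Bool).items = [] from rfl, List.nil_append] at this
    rw [this, hvalues, List.flatMap_map]
  -- phase loop of B
  have hB : ((PySem.List.enumerate ks 0).foldl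
      (fun m p =>
        if (PySem.List.slice ks none (some p.1)).contains p.2 then m
        else
          let idxs := ((PySem.List.enumerate ks 0).filter (fun q => q.2 == p.2)).map (fun q => q.1)
          let dup := decide (1 < idxs.length)
          idxs.foldl (fun m j => m.insert j dup) m)
      (PySem.Dict.empty : PySem.Dict Int Bool)).items
      = (PySem.Set.ofList ks).flatMap
          (fun k => (pvGrp ks k).map (fun j => (j, decide (1 < (pvGrp ks k).length)))) := by
    have hcongr : ∀ (g : _ → List (Int × Bool)),
        (PySem.List.enumerate ks 0).flatMap
          (fun p => if (PySem.List.slice ks none (some p.1)).contains p.2 then [] else g p.2)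
        = (PySem.List.enumerate ks 0).flatMap
          (fun p => if (ks.take p.1.toNat).contains p.2 then [] else g p.2) := by
      intro g
      apply List.flatMap_congr
      intro p hp
      rw [PySem.List.mem_enumerate_iff] at hp
      obtain ⟨j, hj, rfl⟩ := hp
      dsimp only
      rw [PySem.List.slice_to ks (by omega : (0:Int) ≤ 0 + (j:Int))]
    have hcongr2 : ∀ (g : _ → List Int),
        (PySem.List.enumerate ks 0).flatMap
          (fun p => if (PySem.List.slice ks none (some p.1)).contains p.2 then [] else g p.2)
        = (PySem.List.enumerate ks 0).flatMap
          (fun p => if (ks.take p.1.toNat).contains p.2 then [] else g p.2) := by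
      intro g
      apply List.flatMap_congr
      intro p hp
      rw [PySem.List.mem_enumerate_iff] at hp
      obtain ⟨j, hj, rfl⟩ := hp
      dsimp only
      rw [PySem.List.slice_to ks (by omega : (0:Int) ≤ 0 + (j:Int))]
    have := pvDict_fold_groups (l := PySem.List.enumerate ks 0)
      (gi := fun p => pvGrp ks p.2)
      (gc := fun p => decide (1 < (pvGrp ks p.2).length))
      (cond := fun p => (PySem.List.slice ks none (some p.1)).contains p.2)
      (m := PySem.Dict.empty)
      (by
        simp only [PySem.Dict.keys_empty, List.nil_append]
        rw [hcongr2 (fun k => pvGrp ks k),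
          pvFirstocc_flatMap ks (fun k => pvGrp ks k)]
        exact pvFlat_nodup ks _ (PySem.Set.nodup_ofList ks))
    simp only [show (PySem.Dict.empty : PySem.Dict Int Bool).items = [] from rfl,
      List.nil_append] at this
    rw [show (fun (m : PySem.Dict Int Bool) (p : Int × _) =>
        if (PySem.List.slice ks none (some p.1)).contains p.2 then m
        else
          let idxs := ((PySem.List.enumerate ks 0).filter (fun q => q.2 == p.2)).map (fun q => q.1)
          let dup := decide (1 < idxs.length)
          idxs.foldl (fun m j => m.insert j dup) m)
      = (fun (m : PySem.Dict Int Bool) p =>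
          if (PySem.List.slice ks none (some p.1)).contains p.2 then m
          else
            let idxs := pvGrp ks p.2
            let dup := decide (1 < (pvGrp ks p.2).length)
            idxs.foldl (fun m j => m.insert j dup) m) from rfl]
    rw [this, hcongr (fun k => (pvGrp ks k).map (fun j => (j, decide (1 < (pvGrp ks k).length)))),
      pvFirstocc_flatMap ks (fun k => (pvGrp ks k).map (fun j => (j, decide (1 < (pvGrp ks k).length))))]
  simp only []
  rw [hA, hB]

-- ===== VERDICT (by name: the statement is the Claim_ definition above) =====
theorem duplicate_issue_map_spec : Claim_equal_duplicate_issue_map := by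
  intro rows _
  unfold Spec_duplicate_issue_map
  exact pvMain_eq rows
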